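-- pv_equiv track=rewrite | github.com/lengthwisehems/retail2 | warpweft_inventory.py | determine_stretch
-- ===== SOURCE A (Python) =====
-- from typing import Any, Dict, Iterable, List, Optional, Tuple
--
-- def determine_stretch(tags: Iterable[str]) -> str:
--     lowered = [tag.lower() for tag in tags]
--     for tag in lowered:
--         if "stretch-high" in tag or "stretch:high" in tag:
--             return "High Stretch"
--         if "stretch-low" in tag or "stretch:low" in tag:
--             return "Low Stretch"
--         if "stretch:rigid" in tag or tag == "rigid":
--             return "Rigid"
--     if any("sculpting denim" in tag for tag in lowered):
--         return "Sculpting Denim"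
--     return ""
-- ===== SOURCE B (Python) =====
-- def determine_stretch(tags):
--     lowered = [tag.lower() for tag in tags]
--     rules = [
--         ("High Stretch", lambda t: "stretch-high" in t or "stretch:high" in t),
--         ("Low Stretch", lambda t: "stretch-low" in t or "stretch:low" in t),
--         ("Rigid", lambda t: "stretch:rigid" in t or t == "rigid"),
--     ]
--     best_idx, best_cat = None, None
--     for cat, pred in rules:
--         idx = next((i for i, t in enumerate(lowered) if pred(t)), None)
--         if idx is not None and (best_idx is None or idx < best_idx):
--             best_idx, best_cat = idx, cat
--     if best_cat is not None:
--         return best_cat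
--     if any("sculpting denim" in t for t in lowered):
--         return "Sculpting Denim"
--     return ""
-- ===== Notes on version B (the rewrite author's own statement) =====
-- stated objective: alternative
-- what changed: B replaces A's per-tag early-return loop by a data-driven rule table: for each category it computes the index of the first matching tag (enumerate/next), then returns the category with the smallest index, ties broken by rule order; the sculpting fallback stays a separate any() pass.
import Mathlib
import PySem

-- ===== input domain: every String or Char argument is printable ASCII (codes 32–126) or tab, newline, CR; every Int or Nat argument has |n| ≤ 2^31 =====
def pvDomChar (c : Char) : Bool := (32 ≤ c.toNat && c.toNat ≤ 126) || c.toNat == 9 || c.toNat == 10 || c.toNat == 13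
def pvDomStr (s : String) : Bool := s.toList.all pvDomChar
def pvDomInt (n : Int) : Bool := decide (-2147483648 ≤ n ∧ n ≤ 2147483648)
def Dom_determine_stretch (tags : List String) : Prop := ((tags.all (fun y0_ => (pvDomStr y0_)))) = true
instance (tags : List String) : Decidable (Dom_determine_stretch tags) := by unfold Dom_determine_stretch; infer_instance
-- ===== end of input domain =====

-- B replaces A's per-tag early-return loop by a rule-table pass: for each category it finds
-- the index of the first matching tag and returns the category with the smallest index
-- (ties broken by rule order); same result, different decomposition.

-- ===== PORT A =====
-- the for-loop over the lowered tags: returns some category on early return, none if it falls through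
def dsLoopA : List String → Option String
  | [] => none
  | t :: rest =>
    if PySem.Str.isIn "stretch-high" t || PySem.Str.isIn "stretch:high" t then some "High Stretch"
    else if PySem.Str.isIn "stretch-low" t || PySem.Str.isIn "stretch:low" t then some "Low Stretch"
    else if PySem.Str.isIn "stretch:rigid" t || t == "rigid" then some "Rigid"
    else dsLoopA rest

def determine_stretch (tags : List String) : String :=
  let lowered := tags.map PySem.Str.lower
  match dsLoopA lowered with
  | some r => r
  | none =>
    if lowered.any (fun t => PySem.Str.isIn "sculpting denim" t) then "Sculpting Denim" else ""

-- ===== PORT B =====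
-- the three rule predicates of B's rule table
def dsPredHigh (t : String) : Bool := PySem.Str.isIn "stretch-high" t || PySem.Str.isIn "stretch:high" t
def dsPredLow (t : String) : Bool := PySem.Str.isIn "stretch-low" t || PySem.Str.isIn "stretch:low" t
def dsPredRigid (t : String) : Bool := PySem.Str.isIn "stretch:rigid" t || t == "rigid"

-- next((i for i, t in enumerate(lowered) if pred(t)), None)
def dsFirstIdx (p : String → Bool) : List String → Option Nat
  | [] => none
  | t :: rest => if p t then some 0 else (dsFirstIdx p rest).map (· + 1)

-- one step of B's loop over the rule table: keep the (index, category) with strictly smaller index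
def dsBetter (best : Option (Nat × String)) (cat : String) (i : Option Nat) : Option (Nat × String) :=
  match i with
  | none => best
  | some i =>
    match best with
    | none => some (i, cat)
    | some (j, c) => if i < j then some (i, cat) else some (j, c)

def determine_stretch_alt (tags : List String) : String :=
  let lowered := tags.map PySem.Str.lower
  let best := dsBetter (dsBetter (dsBetter none "High Stretch" (dsFirstIdx dsPredHigh lowered))
      "Low Stretch" (dsFirstIdx dsPredLow lowered)) "Rigid" (dsFirstIdx dsPredRigid lowered)
  match best with
  | some (_, c) => c
  | none =>
    if lowered.any (fun t => PySem.Str.isIn "sculpting denim" t) then "Sculpting Denim" else ""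

-- ===== PRECONDITION & SPEC =====
def Spec_determine_stretch (tags : List String) (out : String) : Prop := out = determine_stretch_alt tags
instance (tags : List String) (out : String) : Decidable (Spec_determine_stretch tags out) := by unfold Spec_determine_stretch; infer_instance

-- ===== CLAIM (what is proved, stated in full; the proofs are below) =====
def Claim_equal_determine_stretch : Prop := ∀ (tags : List String), Dom_determine_stretch tags → Spec_determine_stretch tags (determine_stretch tags)

-- ===== LEMMAS AND PROOFS =====
-- the chained rule-table fold of B, as a function of the lowered list
def dsBest (l : List String) : Option (Nat × String) :=
  dsBetter (dsBetter (dsBetter none "High Stretch" (dsFirstIdx dsPredHigh l))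
      "Low Stretch" (dsFirstIdx dsPredLow l)) "Rigid" (dsFirstIdx dsPredRigid l)

def dsShift (b : Option (Nat × String)) : Option (Nat × String) :=
  b.map (fun p => (p.1 + 1, p.2))

theorem dsBetter_shift (b : Option (Nat × String)) (cat : String) (i : Option Nat) :
    dsBetter (dsShift b) cat (i.map (· + 1)) = dsShift (dsBetter b cat i) := by
  cases i with
  | none => rfl
  | some i =>
    cases b with
    | none => rfl
    | some p =>
      simp only [dsBetter, dsShift, Option.map_some]
      by_cases h : i < p.1
      · rw [if_pos h, if_pos (by omega : i + 1 < p.1 + 1)]; rfl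
      · rw [if_neg h, if_neg (by omega : ¬ i + 1 < p.1 + 1)]; rfl

theorem dsBetter_none_shift (cat : String) (i : Option Nat) :
    dsBetter none cat (i.map (· + 1)) = dsShift (dsBetter none cat i) :=
  dsBetter_shift none cat i

theorem dsBetter_zero (c cat : String) (i : Option Nat) :
    dsBetter (some (0, c)) cat i = some (0, c) := by
  cases i with
  | none => rfl
  | some i => simp [dsBetter]

theorem dsBetter_shift_zero (b : Option (Nat × String)) (cat : String) :
    dsBetter (dsShift b) cat (some 0) = some (0, cat) := by
  cases b with
  | none => rfl
  | some p => simp [dsBetter, dsShift]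

theorem dsShift_snd (b : Option (Nat × String)) :
    (dsShift b).map Prod.snd = b.map Prod.snd := by
  cases b with
  | none => rfl
  | some p => rfl

-- A's loop conditions, written with B's named predicates (definitional)
theorem dsLoopA_cons (t : String) (rest : List String) :
    dsLoopA (t :: rest) =
      if dsPredHigh t then some "High Stretch"
      else if dsPredLow t then some "Low Stretch"
      else if dsPredRigid t then some "Rigid"
      else dsLoopA rest := rfl

theorem dsBest_cons (t : String) (rest : List String) :
    dsBest (t :: rest) =
      dsBetter (dsBetter (dsBetter none "High Stretch"
          (if dsPredHigh t then some 0 else (dsFirstIdx dsPredHigh rest).map (· + 1)))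
        "Low Stretch" (if dsPredLow t then some 0 else (dsFirstIdx dsPredLow rest).map (· + 1)))
        "Rigid" (if dsPredRigid t then some 0 else (dsFirstIdx dsPredRigid rest).map (· + 1)) := rfl

theorem dsBest_eq_loopA (l : List String) : (dsBest l).map Prod.snd = dsLoopA l := by
  induction l with
  | nil => rfl
  | cons t rest ih =>
    rw [dsLoopA_cons, dsBest_cons]
    cases h1 : dsPredHigh t with
    | true =>
      simp only [reduceIte]
      have : dsBetter none "High Stretch" (some 0) = some (0, "High Stretch") := rfl
      rw [this, dsBetter_zero, dsBetter_zero]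
      rfl
    | false =>
      simp only [Bool.false_eq_true, if_false]
      rw [dsBetter_none_shift]
      cases h2 : dsPredLow t with
      | true =>
        simp only [reduceIte]
        rw [dsBetter_shift_zero, dsBetter_zero]
        rfl
      | false =>
        simp only [Bool.false_eq_true, if_false]
        rw [dsBetter_shift]
        cases h3 : dsPredRigid t with
        | true =>
          simp only [reduceIte]
          rw [dsBetter_shift_zero]
          rfl
        | false =>
          simp only [Bool.false_eq_true, if_false]
          rw [dsBetter_shift, dsShift_snd]
          exact ih

-- ===== VERDICT (by name: the statement is the Claim_ definition above) =====
theorem determine_stretch_spec : Claim_equal_determine_stretch := by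
  intro tags _
  show determine_stretch tags = determine_stretch_alt tags
  unfold determine_stretch determine_stretch_alt
  dsimp only
  rw [show dsBetter (dsBetter (dsBetter none "High Stretch"
        (dsFirstIdx dsPredHigh (tags.map PySem.Str.lower))) "Low Stretch"
        (dsFirstIdx dsPredLow (tags.map PySem.Str.lower))) "Rigid"
        (dsFirstIdx dsPredRigid (tags.map PySem.Str.lower))
      = dsBest (tags.map PySem.Str.lower) from rfl]
  have h := dsBest_eq_loopA (tags.map PySem.Str.lower)
  cases hb : dsBest (tags.map PySem.Str.lower) with
  | none => rw [hb, Option.map_none] at h; rw [← h]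
  | some p => rw [hb, Option.map_some] at h; rw [← h]
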